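-- pv_equiv track=rewrite | github.com/Koujin22/Mision-09 | Mision_09.py | calcularSuma
-- ===== SOURCE A (Python) =====
-- def calcularSuma(lista):
-- 	suma = 0
-- 	for x in range(len(lista)):
-- 		if(lista[x]==13):
-- 			if(x>0):
-- 				suma= suma - lista[x-1]
-- 			if(x+1<len(lista)):
-- 				suma= suma - lista[x+1]
-- 		else:
-- 			suma+=lista[x]
-- 	return suma
-- ===== SOURCE B (Python) =====
-- def calcularSuma(lista):
--     lefts = [None] + lista
--     rights = lista[1:] + [None]
--     return sum((v if v != 13 else 0) - v * ((l == 13) + (r == 13))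
--                for l, v, r in zip(lefts, lista, rights))
-- ===== Notes on version B (the rewrite author's own statement) =====
-- stated objective: alternative
-- what changed: Element-centric single pass over zipped (left, value, right) neighbor triples: each element contributes itself unless it is 13 and is subtracted once per adjacent 13, replacing A's index-based loop that subtracts neighbors at each 13 position.
import Mathlib
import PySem

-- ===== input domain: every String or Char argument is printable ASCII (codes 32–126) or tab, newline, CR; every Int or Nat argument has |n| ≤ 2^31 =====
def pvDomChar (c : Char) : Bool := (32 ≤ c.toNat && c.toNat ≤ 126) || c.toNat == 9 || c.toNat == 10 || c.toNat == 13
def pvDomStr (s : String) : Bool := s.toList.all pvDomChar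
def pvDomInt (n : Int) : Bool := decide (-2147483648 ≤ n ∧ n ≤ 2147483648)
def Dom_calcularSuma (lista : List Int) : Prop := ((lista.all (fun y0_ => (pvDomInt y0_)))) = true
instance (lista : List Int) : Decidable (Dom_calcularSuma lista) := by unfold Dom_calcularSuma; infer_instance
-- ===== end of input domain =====

-- B replaces A's index-based loop by an element-centric pass over zipped neighbor triples (alternative decomposition, same cost).

-- ===== PORT A =====
-- index loop 'for x in range(len(lista))' with the two guarded neighbor subtractions, step for step
def calcularSuma (lista : List Int) : Int :=
  (List.range lista.length).foldl (fun suma x =>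
    if lista.getD x 0 = 13 then
      let s1 := if x > 0 then suma - lista.getD (x - 1) 0 else suma
      if x + 1 < lista.length then s1 - lista.getD (x + 1) 0 else s1
    else suma + lista.getD x 0) 0

-- ===== PORT B =====
-- Source B: zip of [None]+lista, lista, lista[1:]+[None]; sum of per-element contributions
def calcularSuma_alt (lista : List Int) : Int :=
  let lefts : List (Option Int) := none :: lista.map some
  let rights : List (Option Int) := lista.tail.map some ++ [none]
  ((lefts.zip (lista.zip rights)).map (fun t =>
    (if t.2.1 ≠ 13 then t.2.1 else 0)
      - t.2.1 * ((if t.1 = some 13 then 1 else 0) + (if t.2.2 = some 13 then 1 else 0)))).sum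

-- ===== PRECONDITION & SPEC =====
def Spec_calcularSuma (lista : List Int) (out : Int) : Prop := out = calcularSuma_alt lista
instance (lista : List Int) (out : Int) : Decidable (Spec_calcularSuma lista out) := by unfold Spec_calcularSuma; infer_instance

-- ===== CLAIM (what is proved, stated in full; the proofs are below) =====
def Claim_equal_calcularSuma : Prop := ∀ (lista : List Int), Dom_calcularSuma lista → Spec_calcularSuma lista (calcularSuma lista)

-- ===== LEMMAS AND PROOFS =====

def pvPrevVal : Option Int → Int
  | some p => p
  | none => 0

-- A's per-position recursion carrying the previous element
def goA : Option Int → List Int → Int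
  | _, [] => 0
  | prev, v :: rest =>
    (if v = 13 then
      (-(pvPrevVal prev)) + (match rest with | r :: _ => -r | [] => 0)
    else v) + goA (some v) rest

-- B's per-element recursion carrying the previous element
def goB : Option Int → List Int → Int
  | _, [] => 0
  | prev, v :: rest =>
    ((if v ≠ 13 then v else 0)
      - v * ((if prev = some 13 then 1 else 0) + (if rest.head? = some 13 then 1 else 0)))
      + goB (some v) rest

-- per-index contribution of A's loop body on list t whose (virtual) predecessor is prev
def dP (prev : Option Int) (t : List Int) (i : Nat) : Int :=
  if t.getD i 0 = 13 then
    (-(if i = 0 then pvPrevVal prev else t.getD (i - 1) 0))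
      + (if i + 1 < t.length then -(t.getD (i + 1) 0) else 0)
  else t.getD i 0

theorem foldl_add_g (g : Nat → Int) :
    ∀ (xs : List Nat) (c : Int),
      xs.foldl (fun s x => s + g x) c = c + (xs.map g).sum := by
  intro xs
  induction xs with
  | nil => simp
  | cons x xs ih => intro c; simp [List.foldl, ih]; ring

theorem bodyA_eq (lista : List Int) (suma : Int) (x : Nat) :
    (if lista.getD x 0 = 13 then
      let s1 := if x > 0 then suma - lista.getD (x - 1) 0 else suma
      if x + 1 < lista.length then s1 - lista.getD (x + 1) 0 else s1
    else suma + lista.getD x 0) = suma + dP none lista x := by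
  unfold dP
  simp only [pvPrevVal]
  split_ifs <;> first | (exfalso; omega) | ring

theorem dP_succ (prev : Option Int) (a : Int) (rest : List Int) (i : Nat) :
    dP prev (a :: rest) (i + 1) = dP (some a) rest i := by
  unfold dP
  cases i with
  | zero => simp [pvPrevVal, Nat.lt_iff_add_one_le]
  | succ j => split_ifs <;> simp_all [List.getD] <;> omega

theorem sum_dP_eq_goA : ∀ (t : List Int) (prev : Option Int),
    ((List.range t.length).map (dP prev t)).sum = goA prev t := by
  intro t
  induction t with
  | nil => intro prev; simp [goA]
  | cons a rest ih =>
    intro prev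
    have h1 : List.range (a :: rest).length = 0 :: (List.range rest.length).map Nat.succ := by
      simp [List.range_succ_eq_map]
    rw [h1]
    simp only [List.map_cons, List.map_map, List.sum_cons]
    have h2 : (List.range rest.length).map (dP prev (a :: rest) ∘ Nat.succ)
        = (List.range rest.length).map (dP (some a) rest) := by
      apply List.map_congr_left
      intro i _
      exact dP_succ prev a rest i
    rw [h2, ih (some a)]
    simp only [goA]
    congr 1
    unfold dP
    cases rest with
    | nil => simp [pvPrevVal]
    | cons r rs => simp [pvPrevVal, List.getD]

theorem calcularSuma_eq_goA (lista : List Int) : calcularSuma lista = goA none lista := by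
  unfold calcularSuma
  have hf : (fun (suma : Int) (x : Nat) =>
      if lista.getD x 0 = 13 then
        let s1 := if x > 0 then suma - lista.getD (x - 1) 0 else suma
        if x + 1 < lista.length then s1 - lista.getD (x + 1) 0 else s1
      else suma + lista.getD x 0) = fun s x => s + dP none lista x := by
    funext suma x
    exact bodyA_eq lista suma x
  rw [hf, foldl_add_g]
  simpa using sum_dP_eq_goA lista none

theorem alt_eq_goB : ∀ (l : List Int) (p : Option Int),
    (((p :: l.map some).zip (l.zip (l.tail.map some ++ [none]))).map (fun t =>
      (if t.2.1 ≠ 13 then t.2.1 else 0)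
        - t.2.1 * ((if t.1 = some 13 then 1 else 0) + (if t.2.2 = some 13 then 1 else 0)))).sum
      = goB p l := by
  intro l
  induction l with
  | nil => intro p; simp [goB]
  | cons v rest ih =>
    intro p
    cases rest with
    | nil => simp [goB]
    | cons w rs =>
      have h := ih (some v)
      simp only [List.map_cons, List.tail_cons, List.cons_append, List.zip_cons_cons,
        List.sum_cons] at h ⊢
      rw [h]
      simp only [goB, List.head?_cons]
      rfl

theorem calcularSuma_alt_eq_goB (lista : List Int) : calcularSuma_alt lista = goB none lista := by
  unfold calcularSuma_alt
  exact alt_eq_goB lista none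

theorem goA_eq_goB : ∀ (l : List Int) (prev : Option Int),
    goA prev l = goB prev l
      + (if prev = some 13 then (match l with | v :: _ => v | [] => 0) else 0)
      - (if l.head? = some 13 then pvPrevVal prev else 0) := by
  intro l
  induction l with
  | nil => intro prev; simp [goA, goB]
  | cons v rest ih =>
    intro prev
    simp only [goA, goB]
    rw [ih (some v)]
    rcases prev with _ | p <;>
      cases rest with
      | nil =>
        by_cases hv : v = 13 <;> simp_all [pvPrevVal, goB] <;> (try split_ifs) <;> (try simp_all) <;> ring
      | cons w rs =>
        by_cases hv : v = 13 <;> by_cases hw : w = 13 <;>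
          simp_all [pvPrevVal] <;> (try split_ifs) <;> (try simp_all) <;> ring

-- ===== VERDICT (by name: the statement is the Claim_ definition above) =====
theorem calcularSuma_spec : Claim_equal_calcularSuma := by
  intro lista _
  unfold Spec_calcularSuma
  rw [calcularSuma_eq_goA, calcularSuma_alt_eq_goB]
  have h := goA_eq_goB lista none
  simpa [pvPrevVal] using h
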